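-- pv_equiv track=rewrite | github.com/msg430/Project-Euler | problem24.py | numberUntil
-- ===== SOURCE A (Python) =====
-- import math
--
-- def numberUntil(currentlyAt, numbersLeft, limit):
--     mult = math.factorial(numbersLeft - 1)
--     n = -1
--     while True:
--         n += 1
--         if n*mult+currentlyAt > limit:
--             break
--     # currentlyAt += mult*(n-1)
--     return n-1, mult*(n-1)
-- ===== SOURCE B (Python) =====
-- import math
--
-- def numberUntil(currentlyAt, numbersLeft, limit):
--     mult = math.factorial(numbersLeft - 1)
--     d = limit - currentlyAt
--     n = 0 if d < 0 else d // mult + 1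
--     return n - 1, mult * (n - 1)
-- ===== Notes on version B (the rewrite author's own statement) =====
-- stated objective: simpler
-- what changed: replaces the unit-step counting loop (increment n until n*mult+currentlyAt exceeds limit) with a closed-form floor division (limit-currentlyAt)//mult; on the timed inputs both are dominated by the shared factorial, so no speed is claimed
import Mathlib
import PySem

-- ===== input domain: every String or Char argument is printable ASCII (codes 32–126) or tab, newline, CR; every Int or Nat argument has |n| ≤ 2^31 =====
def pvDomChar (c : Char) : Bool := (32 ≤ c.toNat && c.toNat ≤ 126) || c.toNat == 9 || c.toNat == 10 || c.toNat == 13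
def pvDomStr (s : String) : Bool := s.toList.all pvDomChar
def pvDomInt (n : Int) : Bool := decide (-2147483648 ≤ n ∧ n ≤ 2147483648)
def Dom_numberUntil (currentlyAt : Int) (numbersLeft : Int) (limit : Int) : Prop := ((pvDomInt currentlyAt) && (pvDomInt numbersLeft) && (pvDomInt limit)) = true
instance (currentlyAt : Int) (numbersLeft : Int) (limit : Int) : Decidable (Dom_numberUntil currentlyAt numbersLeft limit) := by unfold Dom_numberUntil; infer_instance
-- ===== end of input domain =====

-- B replaces A's unit-step counting loop by a closed-form floor division (objective: simpler).


-- ===== PORT A =====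
-- Python's `while True: n += 1; if n*mult+currentlyAt > limit: break`,
-- entered with n = -1: each call increments n and tests the break condition.
def numberUntilLoop (mult currentlyAt limit : Int) (hm : 0 < mult) (n : Int) : Int :=
  if (n + 1) * mult + currentlyAt > limit then n + 1
  else numberUntilLoop mult currentlyAt limit hm (n + 1)
termination_by (limit - currentlyAt - n * mult).toNat
decreasing_by
  have h1 : (n + 1) * mult = n * mult + mult := by ring
  omega

def numberUntil (currentlyAt : Int) (numbersLeft : Int) (limit : Int) : List Int :=
  -- mult = math.factorial(numbersLeft - 1); Pre_ restricts to numbersLeft ≥ 1, where .toNat is exact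
  let mult : Int := (Nat.factorial (numbersLeft - 1).toNat : Int)
  let n : Int := numberUntilLoop mult currentlyAt limit
    (Int.natCast_pos.mpr (Nat.factorial_pos _)) (-1)
  [n - 1, mult * (n - 1)]

-- ===== PORT B =====
def numberUntil_alt (currentlyAt : Int) (numbersLeft : Int) (limit : Int) : List Int :=
  let mult : Int := (Nat.factorial (numbersLeft - 1).toNat : Int)
  let d : Int := limit - currentlyAt
  let n : Int := if d < 0 then 0 else PySem.Int.floordiv d mult + 1
  [n - 1, mult * (n - 1)]

-- ===== PRECONDITION & SPEC =====
-- Pre_ excludes numbersLeft < 1, where Python's math.factorial(numbersLeft - 1) raises ValueError.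
def Pre_numberUntil (currentlyAt : Int) (numbersLeft : Int) (limit : Int) : Prop := 1 ≤ numbersLeft
instance (currentlyAt : Int) (numbersLeft : Int) (limit : Int) : Decidable (Pre_numberUntil currentlyAt numbersLeft limit) := by unfold Pre_numberUntil; infer_instance
def pvWitness_numberUntil : Int × Int × Int := (0, 3, 10)

def Spec_numberUntil (currentlyAt : Int) (numbersLeft : Int) (limit : Int) (out : List Int) : Prop := out = numberUntil_alt currentlyAt numbersLeft limit
instance (currentlyAt : Int) (numbersLeft : Int) (limit : Int) (out : List Int) : Decidable (Spec_numberUntil currentlyAt numbersLeft limit out) := by unfold Spec_numberUntil; infer_instance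

-- ===== CLAIM (what is proved, stated in full; the proofs are below) =====
def Claim_equal_numberUntil : Prop := ∀ (currentlyAt : Int) (numbersLeft : Int) (limit : Int), Dom_numberUntil currentlyAt numbersLeft limit → Pre_numberUntil currentlyAt numbersLeft limit → Spec_numberUntil currentlyAt numbersLeft limit (numberUntil currentlyAt numbersLeft limit)

-- ===== LEMMAS AND PROOFS =====

-- The loop started at n returns the larger of n+1 and ⌊(limit-currentlyAt)/mult⌋ + 1.
theorem numberUntilLoop_eq (mult currentlyAt limit : Int) (hm : 0 < mult) (k : Nat) :
    ∀ n : Int, PySem.Int.floordiv (limit - currentlyAt) mult - n ≤ (k : Int) →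
    numberUntilLoop mult currentlyAt limit hm n =
      max (n + 1) (PySem.Int.floordiv (limit - currentlyAt) mult + 1) := by
  induction k with
  | zero =>
    intro n hk
    have hlt : PySem.Int.floordiv (limit - currentlyAt) mult < n + 1 := by omega
    have hcond : limit - currentlyAt < (n + 1) * mult :=
      (PySem.Int.floordiv_lt_iff_lt_mul hm).mp hlt
    rw [numberUntilLoop]
    rw [if_pos (by omega)]
    omega
  | succ k ih =>
    intro n hk
    by_cases hle : PySem.Int.floordiv (limit - currentlyAt) mult ≤ n
    · have hcond : limit - currentlyAt < (n + 1) * mult :=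
        (PySem.Int.floordiv_lt_iff_lt_mul hm).mp (by omega)
      rw [numberUntilLoop]
      rw [if_pos (by omega)]
      omega
    · have hnc : ¬ ((n + 1) * mult + currentlyAt > limit) := by
        intro h
        have := (PySem.Int.floordiv_lt_iff_lt_mul (a := limit - currentlyAt)
          (q := n + 1) hm).mpr (by omega)
        omega
      rw [numberUntilLoop, if_neg hnc]
      rw [ih (n + 1) (by omega)]
      omega

-- The loop entered at n = -1 computes exactly B's closed form.
theorem numberUntilLoop_closed (mult currentlyAt limit : Int) (hm : 0 < mult) :
    numberUntilLoop mult currentlyAt limit hm (-1) =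
      (if limit - currentlyAt < 0 then 0 else PySem.Int.floordiv (limit - currentlyAt) mult + 1) := by
  have hfd : PySem.Int.floordiv (limit - currentlyAt) mult - (-1) ≤
      ((PySem.Int.floordiv (limit - currentlyAt) mult + 1).toNat : Int) := by omega
  rw [numberUntilLoop_eq mult currentlyAt limit hm
    (PySem.Int.floordiv (limit - currentlyAt) mult + 1).toNat (-1) hfd]
  by_cases hd : limit - currentlyAt < 0
  · have h0 : PySem.Int.floordiv (limit - currentlyAt) mult < 0 :=
      (PySem.Int.floordiv_lt_iff_lt_mul (a := limit - currentlyAt) (q := 0) hm).mpr (by omega)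
    rw [if_pos hd]
    omega
  · have h0 : 0 ≤ PySem.Int.floordiv (limit - currentlyAt) mult := by
      by_contra h
      have := (PySem.Int.floordiv_lt_iff_lt_mul (a := limit - currentlyAt) (q := 0) hm).mp (by omega)
      omega
    rw [if_neg hd]
    omega

-- ===== VERDICT (by name: the statement is the Claim_ definition above) =====
theorem numberUntil_spec : Claim_equal_numberUntil := by
  intro currentlyAt numbersLeft limit _ _
  unfold Spec_numberUntil numberUntil numberUntil_alt
  simp only [numberUntilLoop_closed]
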